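-- pv_equiv track=rewrite | github.com/YashB63/GFG-Daily-Questions | Day 438/Another Coin Change Problem/another_coin_change_problem.py | makeChanges
-- ===== SOURCE A (Python) =====
-- from typing import List
--
-- def makeChanges(N : int, k : int, target : int, coins : List[int]) -> bool:
--     dp = [[False] * (target + 1) for _ in range(k + 1)]
--     dp[0][0] = True
--     for i in range(1, k + 1):
--         for j in range(1, target + 1):
--             for l in coins:
--                 if j < l:
--                     continue
--                 dp[i][j] |= dp[i - 1][j - l]
--     return dp[k][target]
-- ===== SOURCE B (Python) =====
-- from typing import List
--
-- def _polymul(a: int, b: int, target: int) -> int: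
--     # boolean polynomial product (OR-convolution on bitmasks), truncated to degrees [0, target]
--     out = 0
--     shift = 0
--     while b:
--         if b & 1:
--             out |= a << shift
--         b >>= 1
--         shift += 1
--     return out & ((1 << (target + 1)) - 1)
--
-- def makeChanges(N: int, k: int, target: int, coins: List[int]) -> bool:
--     # Polynomial view: target is reachable with exactly k coins iff the coefficient of
--     # x^target in (sum over coin values c of x^c)^k is nonzero; compute that boolean
--     # polynomial power by binary exponentiation on bitmasks truncated to degree target.
--     if k == 0:
--         return target == 0
--     if target <= 0:
--         return False
--     base = 0
--     for c in set(coins):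
--         if 0 <= c <= target:
--             base |= 1 << c
--     result = 1  # the polynomial 1 = x^0
--     p = base
--     e = k
--     while e:
--         if e & 1:
--             result = _polymul(result, p, target)
--         e >>= 1
--         if e:
--             p = _polymul(p, p, target)
--     return (result >> target) & 1 == 1
-- ===== Notes on version B (the rewrite author's own statement) =====
-- stated objective: faster
-- what changed: Replaces the triple-nested (count,sum,coin) DP table with binary exponentiation of the boolean coin polynomial: sums reachable with n coins are the set bits of (sum_c x^c)^n held as one bitmask, so k is handled in O(log k) bitmask convolutions instead of k table rows.
import Mathlib
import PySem

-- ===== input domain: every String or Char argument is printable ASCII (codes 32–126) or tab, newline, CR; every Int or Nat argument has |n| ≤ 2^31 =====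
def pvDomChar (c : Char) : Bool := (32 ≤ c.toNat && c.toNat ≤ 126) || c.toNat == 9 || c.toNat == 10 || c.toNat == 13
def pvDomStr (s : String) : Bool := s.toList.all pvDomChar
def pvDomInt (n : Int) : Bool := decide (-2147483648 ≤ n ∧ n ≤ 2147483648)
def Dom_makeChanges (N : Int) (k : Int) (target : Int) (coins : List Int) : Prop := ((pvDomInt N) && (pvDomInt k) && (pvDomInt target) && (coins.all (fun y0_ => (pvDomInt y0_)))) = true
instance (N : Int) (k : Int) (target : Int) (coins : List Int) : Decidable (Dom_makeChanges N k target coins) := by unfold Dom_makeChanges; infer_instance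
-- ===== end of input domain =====

-- B replaces A's triple-nested (count,sum,coin) DP table with binary exponentiation of
-- the boolean coin polynomial held as a bitmask; equal return value on Pre_.

-- ===== PORT A =====
-- A-side helpers. Python's dp is a list of lists; we model the rows and the table
-- as Arrays. The four accessors below are hand-ported indexing/assignment: they are
-- exact for the nonnegative in-range indices A uses on inputs satisfying Pre_
-- (Pre_ excludes exactly the inputs where a Python index is out of range).
def aGetRow (dp : Array (Array Bool)) (i : Int) : Array Bool := dp.getD i.toNat #[]
def aGetCell (row : Array Bool) (j : Int) : Bool := row.getD j.toNat false
def aSetRow (dp : Array (Array Bool)) (i : Int) (r : Array Bool) : Array (Array Bool) :=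
  dp.setIfInBounds i.toNat r
def aSetCell (row : Array Bool) (j : Int) (b : Bool) : Array Bool :=
  row.setIfInBounds j.toNat b

-- the three nested loops of A, innermost first
def coinLoopA (coins : List Int) (i j : Int) (dp : Array (Array Bool)) : Array (Array Bool) :=
  coins.foldl (fun dp l =>
    if j < l then dp
    else
      aSetRow dp i
        (aSetCell (aGetRow dp i) j
          (aGetCell (aGetRow dp i) j || aGetCell (aGetRow dp (i-1)) (j-l)))) dp

def rowLoopA (coins : List Int) (target : Int) (i : Int) (dp : Array (Array Bool)) :
    Array (Array Bool) :=
  (PySem.List.pyRange 1 (target+1) 1).foldl (fun dp j => coinLoopA coins i j dp) dp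

def makeChanges (N : Int) (k : Int) (target : Int) (coins : List Int) : Bool :=
  -- dp = [[False] * (target + 1) for _ in range(k + 1)]
  let dp0 : Array (Array Bool) :=
    ((PySem.List.pyRange 0 (k+1) 1).map (fun _ => Array.replicate (target+1).toNat false)).toArray
  -- dp[0][0] = True
  let dp1 : Array (Array Bool) := aSetRow dp0 0 (aSetCell (aGetRow dp0 0) 0 true)
  -- the nested loops
  let dp2 : Array (Array Bool) :=
    (PySem.List.pyRange 1 (k+1) 1).foldl (fun dp i => rowLoopA coins target i dp) dp1
  -- return dp[k][target]
  aGetCell (aGetRow dp2 k) target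

-- ===== PORT B =====
-- B-side helpers. Python's (nonnegative) big-int bitmasks are ported as Nat with
-- Lean's bit operations, which are exact for nonnegative Python ints.
-- _polymul's while loop over the bits of b:
def polymulGo (a b shift out : Nat) : Nat :=
  if b = 0 then out
  else polymulGo a (b / 2) (shift + 1) (if b % 2 = 1 then out ||| (a <<< shift) else out)
termination_by b
decreasing_by omega

-- _polymul; (target + 1).toNat is exact for the nonnegative target of every call site
def polymul (a b : Nat) (target : Int) : Nat :=
  polymulGo a b 0 0 &&& ((1 <<< (target + 1).toNat) - 1)

-- the binary-exponentiation while loop of B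
def powGo (target : Int) (e p result : Nat) : Nat :=
  if e = 0 then result
  else if e / 2 = 0 then (if e % 2 = 1 then polymul result p target else result)
  else powGo target (e / 2) (polymul p p target)
         (if e % 2 = 1 then polymul result p target else result)
termination_by e
decreasing_by omega

def makeChanges_alt (N : Int) (k : Int) (target : Int) (coins : List Int) : Bool :=
  if k = 0 then decide (target = 0)
  else if target ≤ 0 then false
  else
    -- base |= 1 << c over set(coins): OR is commutative, so Python's hash iteration
    -- order over the set is immaterial to the resulting bitmask
    let base : Nat := (PySem.Set.ofList coins : List Int).foldl
      (fun acc c => if 0 ≤ c ∧ c ≤ target then acc ||| (1 <<< c.toNat) else acc) 0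
    let result := powGo target k.toNat base 1
    -- return (result >> target) & 1 == 1
    decide ((result >>> target.toNat) &&& 1 = 1)

-- ===== PRECONDITION & SPEC =====
-- Pre_ excludes exactly the inputs where Python A raises IndexError: k<0 or target<0
-- (dp[0][0] on an empty table), or k≥1 ∧ target≥1 with a negative coin (index j-l past row end).
def Pre_makeChanges (N : Int) (k : Int) (target : Int) (coins : List Int) : Prop :=
  0 ≤ k ∧ 0 ≤ target ∧ ((∀ c ∈ coins, 0 ≤ c) ∨ k = 0 ∨ target = 0)
instance (N : Int) (k : Int) (target : Int) (coins : List Int) : Decidable (Pre_makeChanges N k target coins) := by unfold Pre_makeChanges; infer_instance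

def pvWitness_makeChanges : Int × Int × Int × List Int := (4, 2, 4, [1, 3])

def Spec_makeChanges (N : Int) (k : Int) (target : Int) (coins : List Int) (out : Bool) : Prop := out = makeChanges_alt N k target coins
instance (N : Int) (k : Int) (target : Int) (coins : List Int) (out : Bool) : Decidable (Spec_makeChanges N k target coins out) := by unfold Spec_makeChanges; infer_instance

-- ===== CLAIM (what is proved, stated in full; the proofs are below) =====
def Claim_equal_makeChanges : Prop := ∀ (N : Int) (k : Int) (target : Int) (coins : List Int), Dom_makeChanges N k target coins → Pre_makeChanges N k target coins → Spec_makeChanges N k target coins (makeChanges N k target coins)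

-- ===== LEMMAS AND PROOFS =====

-- The common reference function: reachF coins target i j = "sum j is reachable with
-- exactly i coins, every partial sum after the first coin lying in [1, target]".
def reachF (coins : List Int) (target : Int) : Nat → Int → Bool
  | 0, j => decide (j = 0)
  | i+1, j => (decide (1 ≤ j) && decide (j ≤ target)) && coins.any (fun c => reachF coins target i (j - c))

theorem reachF_false_of_neg (coins : List Int) (target : Int) (i : Nat) (j : Int)
    (h : j < 0) : reachF coins target i j = false := by
  cases i <;> simp [reachF] <;> omega

theorem reachF_false_of_gt (coins : List Int) (target : Int) (i : Nat) (j : Int)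
    (h0 : 0 ≤ target) (h : target < j) : reachF coins target i j = false := by
  cases i <;> simp [reachF] <;> omega

-- ---------- A side ----------

theorem getD_set_eq {α : Type} (xs : List α) (n : Nat) (v d : α) (h : n < xs.length) :
    (xs.set n v).getD n d = v := by
  simp [List.getD_eq_getElem?_getD, h]

theorem getD_set_ne {α : Type} (xs : List α) (n m : Nat) (v d : α) (h : m ≠ n) :
    (xs.set n v).getD m d = xs.getD m d := by
  simp [List.getD_eq_getElem?_getD, List.getElem?_set_ne h.symm]

theorem getD_of_length_le {α : Type} (l : List α) (n : Nat) (d : α) (h : l.length ≤ n) :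
    l.getD n d = d := by
  simp [List.getD_eq_getElem?_getD, List.getElem?_eq_none h]

theorem getD_replicate_lt {α : Type} (n m : Nat) (a d : α) (h : m < n) :
    (List.replicate n a).getD m d = a := by
  simp [List.getD_eq_getElem?_getD, h]

theorem any_congr_mem {α : Type} (l : List α) (f g : α → Bool) (h : ∀ x ∈ l, f x = g x) :
    l.any f = l.any g := by
  induction l with
  | nil => rfl
  | cons x xs ih => simp only [List.any_cons, h x (by simp), ih (fun y hy => h y (by simp [hy]))]

-- Array access through toList
theorem toList_injA {α : Type} {a b : Array α} (h : a.toList = b.toList) : a = b := by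
  have := congrArg List.toArray h
  simpa using this

theorem agetD_eq {α : Type} (a : Array α) (n : Nat) (d : α) :
    a.getD n d = a.toList.getD n d := by
  unfold Array.getD
  split
  · next h => rw [List.getD_eq_getElem _ _ (by simpa using h)]; simp
  · next h => rw [getD_of_length_le _ _ _ (by simpa using Nat.le_of_not_lt h)]

theorem agetD_set_eq {α : Type} (a : Array α) (n : Nat) (v d : α) (h : n < a.size) :
    (a.setIfInBounds n v).getD n d = v := by
  rw [agetD_eq, Array.toList_setIfInBounds, getD_set_eq _ _ _ _ (by simpa using h)]

theorem agetD_set_ne {α : Type} (a : Array α) (n m : Nat) (v d : α) (h : m ≠ n) :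
    (a.setIfInBounds n v).getD m d = a.getD m d := by
  rw [agetD_eq, Array.toList_setIfInBounds, getD_set_ne _ _ _ _ _ h, agetD_eq]

theorem agetD_of_size_le {α : Type} (a : Array α) (n : Nat) (d : α) (h : a.size ≤ n) :
    a.getD n d = d := by
  rw [agetD_eq, getD_of_length_le _ _ _ (by simpa using h)]

theorem aset_getD_self {α : Type} (a : Array α) (n : Nat) (d : α) (h : n < a.size) :
    a.setIfInBounds n (a.getD n d) = a := by
  apply toList_injA
  rw [Array.toList_setIfInBounds, agetD_eq, List.getD_eq_getElem _ _ (by simpa using h),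
    List.set_getElem_self]

theorem aset_set {α : Type} (a : Array α) (n : Nat) (v w : α) :
    (a.setIfInBounds n v).setIfInBounds n w = a.setIfInBounds n w := by
  apply toList_injA
  rw [Array.toList_setIfInBounds, Array.toList_setIfInBounds, Array.toList_setIfInBounds,
    List.set_set]

theorem agetD_replicate_lt (n m : Nat) (d : Bool) (h : m < n) :
    (Array.replicate n false).getD m d = false := by
  rw [agetD_eq, Array.toList_replicate, getD_replicate_lt _ _ _ _ h]

-- natCast forms of the accessors
theorem aGetRow_natCast (dp : Array (Array Bool)) (n : Nat) :
    aGetRow dp (n:Int) = dp.getD n #[] := by simp [aGetRow]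
theorem aGetCell_natCast (row : Array Bool) (n : Nat) :
    aGetCell row (n:Int) = row.getD n false := by simp [aGetCell]
theorem aSetRow_natCast (dp : Array (Array Bool)) (n : Nat) (r : Array Bool) :
    aSetRow dp (n:Int) r = dp.setIfInBounds n r := by simp [aSetRow]
theorem aSetCell_natCast (row : Array Bool) (n : Nat) (b : Bool) :
    aSetCell row (n:Int) b = row.setIfInBounds n b := by simp [aSetCell]

-- value written by the inner coin loop at row i = iN, column j = jN
def gval (coins : List Int) (rowPrev : Array Bool) (b0 : Bool) (jN : Nat) : Bool :=
  b0 || coins.any (fun l => !decide ((jN:Int) < l) && rowPrev.getD ((jN:Int) - l).toNat false)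

theorem coinLoopA_eq (coins : List Int) (dp : Array (Array Bool)) (iN jN : Nat) (row : Array Bool)
    (b : Bool) (hi1 : 1 ≤ iN) (hiN : iN < dp.size) (hjN : jN < row.size) :
    coinLoopA coins (iN:Int) (jN:Int) (dp.setIfInBounds iN (row.setIfInBounds jN b))
      = dp.setIfInBounds iN (row.setIfInBounds jN (gval coins (dp.getD (iN-1) #[]) b jN)) := by
  induction coins generalizing b with
  | nil => unfold coinLoopA gval; simp
  | cons c cs ih =>
    simp only [coinLoopA, List.foldl_cons] at ih ⊢
    by_cases hsk : (jN:Int) < c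
    · rw [if_pos hsk, ih b]
      unfold gval
      simp [hsk, Bool.or_assoc]
    · rw [if_neg hsk]
      have e1 : aGetRow (dp.setIfInBounds iN (row.setIfInBounds jN b)) (iN:Int)
          = row.setIfInBounds jN b := by
        rw [aGetRow_natCast, agetD_set_eq _ _ _ _ hiN]
      have hc : (iN:Int) - 1 = ((iN-1 : Nat) : Int) := by omega
      have e2 : aGetRow (dp.setIfInBounds iN (row.setIfInBounds jN b)) ((iN:Int)-1)
          = dp.getD (iN-1) #[] := by
        rw [hc, aGetRow_natCast, agetD_set_ne _ _ _ _ _ (by omega)]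
      rw [e1, e2]
      rw [aGetCell_natCast (row.setIfInBounds jN b) jN, agetD_set_eq row jN b false hjN]
      rw [aSetCell_natCast (row.setIfInBounds jN b) jN, aset_set]
      rw [aSetRow_natCast (dp.setIfInBounds iN (row.setIfInBounds jN b)) iN, aset_set]
      rw [ih]
      unfold gval
      simp only [List.any_cons, aGetCell]
      simp [hsk, Bool.or_assoc]

-- row after the j-loop, updated at columns 1..m
def rowUpTo (g : Nat → Bool) (row : Array Bool) : Nat → Array Bool
  | 0 => row
  | m+1 => (rowUpTo g row m).setIfInBounds (m+1) (g (m+1))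

theorem rowUpTo_size (g : Nat → Bool) (row : Array Bool) (m : Nat) :
    (rowUpTo g row m).size = row.size := by
  induction m with
  | zero => rfl
  | succ m ih => simp [rowUpTo, Array.size_setIfInBounds, ih]

theorem rowUpTo_getD (g : Nat → Bool) (row : Array Bool) (m j : Nat) (hm : m < row.size) :
    (rowUpTo g row m).getD j false
      = if 1 ≤ j ∧ j ≤ m then g j else row.getD j false := by
  induction m with
  | zero => simp [rowUpTo]; omega
  | succ m ih =>
    have hm' : m < row.size := by omega
    by_cases hj : j = m+1
    · subst hj
      rw [rowUpTo, agetD_set_eq _ _ _ _ (by rw [rowUpTo_size]; omega)]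
      simp
    · rw [rowUpTo, agetD_set_ne _ _ _ _ _ hj, ih hm']
      by_cases h1 : 1 ≤ j ∧ j ≤ m
      · simp [h1]; omega
      · have : ¬ (1 ≤ j ∧ j ≤ m + 1) := by omega
        simp [h1, this]

theorem rowFold_aux (coins : List Int) (dp : Array (Array Bool)) (iN : Nat)
    (hi1 : 1 ≤ iN) (hiN : iN < dp.size) (m : Nat) (hm : m < (dp.getD iN #[]).size) :
    (PySem.List.pyRange 1 ((m:Int)+1) 1).foldl (fun dp j => coinLoopA coins (iN:Int) j dp) dp
      = dp.setIfInBounds iN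
          (rowUpTo (fun j => gval coins (dp.getD (iN-1) #[]) ((dp.getD iN #[]).getD j false) j)
            (dp.getD iN #[]) m) := by
  induction m with
  | zero =>
    rw [PySem.List.pyRange_one_eq_nil (by omega)]
    simp only [List.foldl_nil, rowUpTo]
    exact (aset_getD_self dp iN #[] hiN).symm
  | succ m ih =>
    have hm' : m < (dp.getD iN #[]).size := by omega
    have hc1 : ((m+1:Nat):Int)+1 = ((m:Int)+1)+1 := by push_cast; ring
    rw [hc1, PySem.List.pyRange_one_succ_right (by omega), List.foldl_append, ih hm']
    simp only [List.foldl_cons, List.foldl_nil]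
    have hcast : ((m:Int)+1) = ((m+1:Nat):Int) := by push_cast; ring
    rw [hcast]
    set g := fun j => gval coins (dp.getD (iN-1) #[]) ((dp.getD iN #[]).getD j false) j with hg
    set R := rowUpTo g (dp.getD iN #[]) m with hRdef
    have hlen : R.size = (dp.getD iN #[]).size := rowUpTo_size _ _ _
    rw [show dp.setIfInBounds iN R
          = dp.setIfInBounds iN (R.setIfInBounds (m+1) (R.getD (m+1) false)) by
        rw [aset_getD_self R (m+1) false (by omega)]]
    rw [coinLoopA_eq coins dp iN (m+1) R (R.getD (m+1) false) hi1 hiN (by omega)]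
    have hRg : R.getD (m+1) false = (dp.getD iN #[]).getD (m+1) false := by
      rw [hRdef, rowUpTo_getD _ _ m (m+1) hm', if_neg (by omega : ¬(1 ≤ m+1 ∧ m+1 ≤ m))]
    rw [hRg, hRdef]
    rfl

theorem rowLoopA_eq (coins : List Int) (target : Int) (dp : Array (Array Bool)) (iN : Nat)
    (hi1 : 1 ≤ iN) (hiN : iN < dp.size) (ht : 0 ≤ target)
    (hrow : (dp.getD iN #[]).size = target.toNat + 1) :
    rowLoopA coins target (iN:Int) dp
      = dp.setIfInBounds iN
          (rowUpTo (fun j => gval coins (dp.getD (iN-1) #[]) ((dp.getD iN #[]).getD j false) j)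
            (dp.getD iN #[]) target.toNat) := by
  unfold rowLoopA
  have h1 : target + 1 = ((target.toNat : Int) + 1) := by omega
  rw [h1, rowFold_aux coins dp iN hi1 hiN target.toNat (by omega)]

-- loop invariant for the outer loop
def InvA (coins : List Int) (target : Int) (K T i0 : Nat) (dp : Array (Array Bool)) : Prop :=
  dp.size = K+1 ∧
  (∀ m : Nat, m ≤ K → (dp.getD m #[]).size = T+1) ∧
  (∀ m : Nat, m ≤ i0 → m ≤ K → ∀ j : Nat, j ≤ T →
      (dp.getD m #[]).getD j false = reachF coins target m (j:Int)) ∧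
  (∀ m : Nat, i0 < m → m ≤ K → dp.getD m #[] = Array.replicate (T+1) false)

theorem InvA_step (coins : List Int) (target : Int) (K T i0 : Nat) (dp : Array (Array Bool))
    (ht : target = (T:Int)) (hinv : InvA coins target K T i0 dp) (hi0 : i0 < K) :
    InvA coins target K T (i0+1) (rowLoopA coins target ((i0+1:Nat):Int) dp) := by
  obtain ⟨hlen, hrows, hval, hfresh⟩ := hinv
  have htn : target.toNat = T := by omega
  have ht0 : 0 ≤ target := by omega
  have hiN : i0+1 < dp.size := by omega
  have hrowlen : (dp.getD (i0+1) #[]).size = T+1 := hrows (i0+1) (by omega)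
  have hrowval : dp.getD (i0+1) #[] = Array.replicate (T+1) false := hfresh (i0+1) (by omega) (by omega)
  have hlen0 : (dp.getD i0 #[]).size = T+1 := hrows i0 (by omega)
  rw [rowLoopA_eq coins target dp (i0+1) (by omega) hiN ht0 (by omega)]
  rw [htn]
  have hsub : (i0+1) - 1 = i0 := by omega
  rw [hsub]
  refine ⟨by simp [Array.size_setIfInBounds, hlen], ?_, ?_, ?_⟩
  · intro m hm
    by_cases hmi : m = i0+1
    · subst hmi
      rw [agetD_set_eq _ _ _ _ hiN, rowUpTo_size]
      exact hrowlen
    · rw [agetD_set_ne _ _ _ _ _ hmi]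
      exact hrows m hm
  · intro m hm hmK j hj
    by_cases hmi : m = i0+1
    · subst hmi
      rw [agetD_set_eq _ _ _ _ hiN]
      rw [rowUpTo_getD _ _ T j (by omega)]
      by_cases hj1 : 1 ≤ j ∧ j ≤ T
      · rw [if_pos hj1]
        have hrow0 : (dp.getD (i0+1) #[]).getD j false = false := by
          rw [hrowval]; exact agetD_replicate_lt _ _ _ (by omega)
        rw [hrow0]
        unfold gval
        simp only [Bool.false_or]
        simp only [reachF]
        have hg1 : decide (1 ≤ (j:Int)) = true := by
          simp only [decide_eq_true_eq]; omega
        have hg2 : decide ((j:Int) ≤ target) = true := by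
          simp only [decide_eq_true_eq]; omega
        rw [hg1, hg2]
        simp only [Bool.true_and]
        apply any_congr_mem
        intro l _
        by_cases hlj : (j:Int) < l
        · rw [reachF_false_of_neg coins target i0 ((j:Int) - l) (by omega)]
          simp [hlj]
        · have h0 : 0 ≤ (j:Int) - l := by omega
          have hdec : (!decide ((j:Int) < l)) = true := by simp [hlj]
          rw [hdec, Bool.true_and]
          by_cases hle : (j:Int) - l ≤ target
          · have hTle : ((j:Int)-l).toNat ≤ T := by omega
            rw [hval i0 (by omega) (by omega) (((j:Int)-l).toNat) hTle,
              Int.toNat_of_nonneg h0]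
          · rw [reachF_false_of_gt coins target i0 _ ht0 (by omega)]
            exact agetD_of_size_le _ _ _ (by omega)
      · rw [if_neg hj1]
        have hj0 : j = 0 := by omega
        subst hj0
        rw [hrowval, agetD_replicate_lt _ _ _ (by omega)]
        simp [reachF]
    · rw [agetD_set_ne _ _ _ _ _ hmi]
      exact hval m (by omega) hmK j hj
  · intro m hm hmK
    rw [agetD_set_ne _ _ _ _ _ (by omega)]
    exact hfresh m (by omega) hmK

theorem makeChanges_eq_reachF (N k target : Int) (coins : List Int)
    (hk : 0 ≤ k) (ht : 0 ≤ target) :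
    makeChanges N k target coins = reachF coins target k.toNat target := by
  set K := k.toNat with hK
  set T := target.toNat with hT
  have hkK : k = (K:Int) := by omega
  have htT : target = (T:Int) := by omega
  simp only [makeChanges]
  have h1 : ((k+1) - 0).toNat = K+1 := by omega
  have h2 : (target+1).toNat = T+1 := by omega
  have hdp0 : (PySem.List.pyRange 0 (k+1) 1).map
        (fun _ => Array.replicate (target+1).toNat false)
      = List.replicate (K+1) (Array.replicate (T+1) false) := by
    rw [h2, List.map_const', PySem.List.length_pyRange_one, h1]
  rw [hdp0]
  have hA0 : (List.replicate (K+1) (Array.replicate (T+1) false)).toArray.getD 0 #[]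
      = Array.replicate (T+1) false := by
    rw [agetD_eq]
    simp
  have hdp1 : aSetRow (List.replicate (K+1) (Array.replicate (T+1) false)).toArray 0
        (aSetCell (aGetRow (List.replicate (K+1) (Array.replicate (T+1) false)).toArray 0) 0 true)
      = (List.replicate (K+1) (Array.replicate (T+1) false)).toArray.setIfInBounds 0
          ((Array.replicate (T+1) false).setIfInBounds 0 true) := by
    simp only [aSetRow, aSetCell, aGetRow, Int.toNat_zero]
    rw [hA0]
  rw [hdp1]
  set dp1 : Array (Array Bool) :=
      (List.replicate (K+1) (Array.replicate (T+1) false)).toArray.setIfInBounds 0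
        ((Array.replicate (T+1) false).setIfInBounds 0 true) with hdp1def
  have hbase : ∀ m : Nat, m ≤ K → m ≠ 0 →
      dp1.getD m #[] = Array.replicate (T+1) false := by
    intro m hm hm0
    rw [hdp1def, agetD_set_ne _ _ _ _ _ hm0, agetD_eq]
    have hL : ((List.replicate (K+1) (Array.replicate (T+1) false)).toArray).toList
        = List.replicate (K+1) (Array.replicate (T+1) false) := by simp
    rw [hL, getD_replicate_lt _ _ _ _ (by omega : m < K+1)]
  have hsize1 : dp1.size = K+1 := by
    rw [hdp1def]
    simp [Array.size_setIfInBounds]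
  have hInv0 : InvA coins target K T 0 dp1 := by
    refine ⟨hsize1, ?_, ?_, ?_⟩
    · intro m hm
      by_cases hm0 : m = 0
      · subst hm0
        rw [hdp1def, agetD_set_eq _ _ _ _ (by
          have : (List.replicate (K+1) (Array.replicate (T+1) false)).toArray.size = K+1 := by
            simp
          omega)]
        simp [Array.size_setIfInBounds]
      · rw [hbase m hm hm0]
        simp
    · intro m hm _ j hj
      have hm0 : m = 0 := by omega
      subst hm0
      rw [hdp1def, agetD_set_eq _ _ _ _ (by
        have : (List.replicate (K+1) (Array.replicate (T+1) false)).toArray.size = K+1 := by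
          simp
        omega)]
      by_cases hj0 : j = 0
      · subst hj0
        rw [agetD_set_eq _ _ _ _ (by simp)]
        simp [reachF]
      · rw [agetD_set_ne _ _ _ _ _ hj0, agetD_replicate_lt _ _ _ (by omega)]
        simp [reachF]
        omega
    · intro m hm hmK
      exact hbase m hmK (by omega)
  have aux : ∀ n : Nat, n ≤ K →
      InvA coins target K T n
        ((PySem.List.pyRange 1 ((n:Int)+1) 1).foldl
          (fun dp i => rowLoopA coins target i dp) dp1) := by
    intro n
    induction n with
    | zero =>
      intro _
      rw [PySem.List.pyRange_one_eq_nil (by omega)]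
      simpa using hInv0
    | succ n ih =>
      intro hn
      have hc1 : ((n+1:Nat):Int)+1 = ((n:Int)+1)+1 := by push_cast; ring
      rw [hc1, PySem.List.pyRange_one_succ_right (by omega), List.foldl_append]
      simp only [List.foldl_cons, List.foldl_nil]
      have hcast : ((n:Int)+1) = ((n+1:Nat):Int) := by push_cast; ring
      rw [hcast]
      exact InvA_step coins target K T n _ htT (ih (by omega)) (by omega)
  have hk1 : k + 1 = (K:Int) + 1 := by omega
  rw [hk1]
  have inv := aux K (le_refl K)
  obtain ⟨_, _, hval, _⟩ := inv
  have hread := hval K (le_refl K) (le_refl K) T (le_refl T)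
  rw [hkK, htT]
  rw [htT] at hread
  simp only [aGetCell, aGetRow, Int.toNat_natCast]
  exact hread

-- ---------- spec predicates ----------

-- "j is the sum of exactly i coins drawn (with repetition) from coins"
def Ex (coins : List Int) (i : Nat) (j : Int) : Prop :=
  ∃ l : List Int, l.length = i ∧ (∀ x ∈ l, x ∈ coins) ∧ l.sum = j

-- "s is the sum of exactly n exponents that are set bits of base"
def PowP (base n s : Nat) : Prop :=
  ∃ l : List Nat, l.length = n ∧ (∀ x ∈ l, base.testBit x = true) ∧ l.sum = s

theorem length_le_sum_of_one_le (l : List Int) (h : ∀ x ∈ l, 1 ≤ x) :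
    (l.length : Int) ≤ l.sum := by
  induction l with
  | nil => simp
  | cons x xs ih =>
    have hx := h x (by simp)
    have := ih (fun y hy => h y (by simp [hy]))
    simp only [List.length_cons, List.sum_cons]
    push_cast
    omega

-- ---------- reachF ↔ Ex (coins nonnegative) ----------

theorem reachF_iff_Ex (coins : List Int) (target : Int) (hc : ∀ c ∈ coins, 0 ≤ c) :
    ∀ (i : Nat) (j : Int),
      reachF coins target i j = true ↔ (Ex coins i j ∧ (i = 0 ∨ (1 ≤ j ∧ j ≤ target))) := by
  intro i
  induction i with
  | zero =>
    intro j
    simp only [reachF, decide_eq_true_eq, Ex]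
    constructor
    · rintro rfl; exact ⟨⟨[], rfl, by simp, rfl⟩, by simp⟩
    · rintro ⟨⟨l, hlen, _, hsum⟩, _⟩
      rw [List.length_eq_zero_iff] at hlen
      subst hlen; simpa using hsum.symm
  | succ i ih =>
    intro j
    simp only [reachF, Bool.and_eq_true, decide_eq_true_eq, List.any_eq_true]
    constructor
    · rintro ⟨⟨h1, h2⟩, c, hcmem, hr⟩
      obtain ⟨⟨l, hlen, hmem, hsum⟩, _⟩ := (ih (j - c)).mp hr
      refine ⟨⟨c :: l, by simp [hlen], ?_, by simp [hsum]⟩, Or.inr ⟨h1, h2⟩⟩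
      intro x hx
      rcases List.mem_cons.mp hx with rfl | hx
      · exact hcmem
      · exact hmem x hx
    · rintro ⟨⟨l, hlen, hmem, hsum⟩, hj⟩
      rcases hj with hj | hj
      · exact absurd hj (by omega)
      refine ⟨⟨hj.1, hj.2⟩, ?_⟩
      cases i with
      | zero =>
        obtain ⟨c, rfl⟩ := List.length_eq_one_iff.mp hlen
        have hcj : c = j := by simpa using hsum
        refine ⟨c, hmem c (by simp), ?_⟩
        apply (ih (j - c)).mpr
        exact ⟨⟨[], rfl, by simp, by simp only [List.sum_nil]; omega⟩, Or.inl rfl⟩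
      | succ i' =>
        by_cases h0 : (0:Int) ∈ l
        · obtain ⟨l₁, l₂, rfl⟩ := List.append_of_mem h0
          refine ⟨0, hmem 0 h0, ?_⟩
          apply (ih (j - 0)).mpr
          have hlen' : (l₁ ++ l₂).length = i' + 1 := by
            simp at hlen ⊢; omega
          have hsum' : (l₁ ++ l₂).sum = j - 0 := by
            simp at hsum ⊢; omega
          refine ⟨⟨l₁ ++ l₂, hlen', ?_, hsum'⟩, Or.inr ⟨by omega, by omega⟩⟩
          intro x hx
          apply hmem
          rcases List.mem_append.mp hx with hx | hx
          · exact List.mem_append.mpr (Or.inl hx)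
          · exact List.mem_append.mpr (Or.inr (by simp [hx]))
        · obtain ⟨x, rest, rfl⟩ : ∃ x rest, l = x :: rest := by
            cases l with
            | nil => simp at hlen
            | cons x rest => exact ⟨x, rest, rfl⟩
          have hrest1 : ∀ y ∈ rest, 1 ≤ y := by
            intro y hy
            have h1 := hc y (hmem y (by simp [hy]))
            have h2 : y ≠ 0 := by
              intro hy0
              exact h0 (by rw [← hy0]; exact List.mem_cons_of_mem x hy)
            omega
          have hsumrest : rest.sum = j - x := by
            simp at hsum; omega
          have hlenrest : rest.length = i' + 1 := by simpa using hlen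
          have hge : (1:Int) ≤ j - x := by
            have := length_le_sum_of_one_le rest hrest1
            rw [hsumrest, hlenrest] at this
            push_cast at this
            omega
          have hx0 : 0 ≤ x := hc x (hmem x (by simp))
          refine ⟨x, hmem x (by simp), ?_⟩
          apply (ih (j - x)).mpr
          exact ⟨⟨rest, hlenrest, fun y hy => hmem y (by simp [hy]), hsumrest⟩,
            Or.inr ⟨hge, by omega⟩⟩

-- ---------- bitmask lemmas for B ----------

theorem polymulGo_testBit (a : Nat) : ∀ (b shift out s : Nat),
    ((polymulGo a b shift out).testBit s = true) ↔
      (out.testBit s = true ∨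
        ∃ u v, b.testBit v = true ∧ u + (shift + v) = s ∧ a.testBit u = true) := by
  intro b
  induction b using Nat.strong_induction_on with
  | _ b ih =>
    intro shift out s
    rw [polymulGo]
    by_cases hb : b = 0
    · subst hb; simp
    · rw [if_neg hb, ih (b / 2) (by omega)]
      have hbit0 : b.testBit 0 = decide (b % 2 = 1) := Nat.testBit_zero b
      constructor
      · rintro (hout | ⟨u, v, hbv, huv, hau⟩)
        · by_cases hpar : b % 2 = 1
          · rw [if_pos hpar, Nat.testBit_or, Bool.or_eq_true] at hout
            rcases hout with h | h
            · exact Or.inl h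
            · rw [Nat.testBit_shiftLeft, Bool.and_eq_true, decide_eq_true_eq] at h
              exact Or.inr ⟨s - shift, 0, by rw [hbit0]; simpa using hpar, by omega, h.2⟩
          · rw [if_neg hpar] at hout
            exact Or.inl hout
        · exact Or.inr ⟨u, v + 1, by rw [← Nat.testBit_div_two]; exact hbv, by omega, hau⟩
      · rintro (hout | ⟨u, v, hbv, huv, hau⟩)
        · refine Or.inl ?_
          by_cases hpar : b % 2 = 1
          · rw [if_pos hpar, Nat.testBit_or, hout]; simp
          · rwa [if_neg hpar]
        · cases v with
          | zero =>
            have hpar : b % 2 = 1 := by rw [hbit0] at hbv; simpa using hbv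
            refine Or.inl ?_
            rw [if_pos hpar, Nat.testBit_or]
            have h2 : (a <<< shift).testBit s = true := by
              rw [Nat.testBit_shiftLeft]
              have h1 : shift ≤ s := by omega
              have h3 : s - shift = u := by omega
              simp [h1, h3, hau]
            simp [h2]
          | succ v' =>
            exact Or.inr ⟨u, v', by rw [Nat.testBit_div_two]; exact hbv, by omega, hau⟩

theorem polymul_testBit (a b : Nat) (target : Int) (ht : 0 ≤ target) (s : Nat) :
    ((polymul a b target).testBit s = true) ↔
      (s ≤ target.toNat ∧ ∃ u v, u + v = s ∧ a.testBit u = true ∧ b.testBit v = true) := by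
  unfold polymul
  have hT : (target + 1).toNat = target.toNat + 1 := by omega
  rw [Nat.testBit_and, hT, Nat.shiftLeft_eq, one_mul, Nat.testBit_two_pow_sub_one,
    Bool.and_eq_true, polymulGo_testBit]
  simp only [Nat.zero_testBit, decide_eq_true_eq]
  constructor
  · rintro ⟨h | ⟨u, v, hbv, huv, hau⟩, hs⟩
    · simp at h
    · exact ⟨by omega, u, v, by omega, hau, hbv⟩
  · rintro ⟨hs, u, v, huv, hau, hbv⟩
    exact ⟨Or.inr ⟨u, v, hbv, by omega, hau⟩, by omega⟩

theorem PowP_zero (base s : Nat) : PowP base 0 s ↔ s = 0 := by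
  constructor
  · rintro ⟨l, hlen, _, hsum⟩
    rw [List.length_eq_zero_iff] at hlen
    subst hlen; simpa using hsum.symm
  · rintro rfl; exact ⟨[], rfl, by simp, rfl⟩

theorem PowP_one (base s : Nat) : PowP base 1 s ↔ base.testBit s = true := by
  constructor
  · rintro ⟨l, hlen, hmem, hsum⟩
    obtain ⟨c, rfl⟩ := List.length_eq_one_iff.mp hlen
    have : c = s := by simpa using hsum
    subst this
    exact hmem c (by simp)
  · intro h
    exact ⟨[s], rfl, by simpa using h, by simp⟩

theorem PowP_add (base m n s : Nat) :
    PowP base (m + n) s ↔ ∃ u v, u + v = s ∧ PowP base m u ∧ PowP base n v := by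
  constructor
  · rintro ⟨l, hlen, hmem, hsum⟩
    refine ⟨(l.take m).sum, (l.drop m).sum, by rw [← hsum]; exact (List.sum_take_add_sum_drop l m), ?_, ?_⟩
    · exact ⟨l.take m, by simp [hlen], fun x hx => hmem x (List.mem_of_mem_take hx), rfl⟩
    · exact ⟨l.drop m, by simp [hlen], fun x hx => hmem x (List.mem_of_mem_drop hx), rfl⟩
  · rintro ⟨u, v, huv, ⟨l1, hl1, hm1, hs1⟩, ⟨l2, hl2, hm2, hs2⟩⟩
    refine ⟨l1 ++ l2, by simp [hl1, hl2], ?_, by simp [hs1, hs2, huv]⟩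
    intro x hx
    rcases List.mem_append.mp hx with hx | hx
    · exact hm1 x hx
    · exact hm2 x hx

-- "X is exactly the truncated bitmask of PowP base n"
def IsPow (target : Int) (base n X : Nat) : Prop :=
  ∀ s : Nat, X.testBit s = true ↔ (s ≤ target.toNat ∧ PowP base n s)

theorem IsPow_polymul (target : Int) (ht : 0 ≤ target) (base m n A B : Nat)
    (hA : IsPow target base m A) (hB : IsPow target base n B) :
    IsPow target base (m + n) (polymul A B target) := by
  intro s
  rw [polymul_testBit A B target ht s, PowP_add]
  constructor
  · rintro ⟨hs, u, v, huv, hau, hbv⟩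
    exact ⟨hs, u, v, huv, ((hA u).mp hau).2, ((hB v).mp hbv).2⟩
  · rintro ⟨hs, u, v, huv, hu, hv⟩
    exact ⟨hs, u, v, huv, (hA u).mpr ⟨by omega, hu⟩, (hB v).mpr ⟨by omega, hv⟩⟩

theorem IsPow_powGo (target : Int) (ht : 0 ≤ target) (base : Nat) :
    ∀ (e : Nat), 1 ≤ e → ∀ (p result r m : Nat),
      IsPow target base m p → IsPow target base r result →
      IsPow target base (r + e * m) (powGo target e p result) := by
  intro e
  induction e using Nat.strong_induction_on with
  | _ e ih =>
    intro he p result r m hp hr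
    rw [powGo, if_neg (by omega : ¬ e = 0)]
    have hres' : IsPow target base (r + (e % 2) * m)
        (if e % 2 = 1 then polymul result p target else result) := by
      by_cases hpar : e % 2 = 1
      · rw [if_pos hpar, hpar, one_mul]
        exact IsPow_polymul target ht base r m result p hr hp
      · rw [if_neg hpar]
        have : e % 2 = 0 := by omega
        rw [this, zero_mul, Nat.add_zero]
        exact hr
    by_cases hq : e / 2 = 0
    · rw [if_pos hq]
      have he1 : e = 1 := by omega
      subst he1
      simpa using hres'
    · rw [if_neg hq]
      have hpp : IsPow target base (m + m) (polymul p p target) :=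
        IsPow_polymul target ht base m m p p hp hp
      have := ih (e / 2) (by omega) (by omega) (polymul p p target)
        (if e % 2 = 1 then polymul result p target else result)
        (r + (e % 2) * m) (m + m) hpp hres'
      have harith : r + e % 2 * m + e / 2 * (m + m) = r + e * m := by
        have hdm : e = 2 * (e / 2) + e % 2 := (Nat.div_add_mod e 2).symm
        calc r + e % 2 * m + e / 2 * (m + m)
            = r + (2 * (e / 2) + e % 2) * m := by ring
          _ = r + e * m := by rw [← hdm]
      rwa [harith] at this

-- the bitmask built from set(coins)
theorem baseFold_testBit (target : Int) (l : List Int) :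
    ∀ (acc : Nat) (s : Nat),
      ((l.foldl (fun acc c => if 0 ≤ c ∧ c ≤ target then acc ||| (1 <<< c.toNat) else acc)
          acc).testBit s = true)
        ↔ (acc.testBit s = true ∨ ((s:Int) ∈ l ∧ (s:Int) ≤ target)) := by
  induction l with
  | nil => simp
  | cons c tl ih =>
    intro acc s
    simp only [List.foldl_cons]
    by_cases hcg : 0 ≤ c ∧ c ≤ target
    · rw [if_pos hcg, ih]
      have hsingle : ((acc ||| (1 <<< c.toNat)).testBit s = true)
          ↔ (acc.testBit s = true ∨ s = c.toNat) := by
        rw [Nat.testBit_or, Bool.or_eq_true, Nat.shiftLeft_eq, one_mul, Nat.testBit_two_pow,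
          decide_eq_true_eq]
        constructor
        · rintro (h|h); exacts [Or.inl h, Or.inr h.symm]
        · rintro (h|h); exacts [Or.inl h, Or.inr h.symm]
      rw [hsingle]
      constructor
      · rintro ((h | h) | ⟨hmem, hle⟩)
        · exact Or.inl h
        · refine Or.inr ⟨by simp [h]; omega, by omega⟩
        · exact Or.inr ⟨by simp [hmem], hle⟩
      · rintro (h | ⟨hmem, hle⟩)
        · exact Or.inl (Or.inl h)
        · rcases List.mem_cons.mp hmem with hsc | hmem
          · exact Or.inl (Or.inr (by omega))
          · exact Or.inr ⟨hmem, hle⟩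
    · rw [if_neg hcg, ih]
      constructor
      · rintro (h | ⟨hmem, hle⟩)
        · exact Or.inl h
        · exact Or.inr ⟨by simp [hmem], hle⟩
      · rintro (h | ⟨hmem, hle⟩)
        · exact Or.inl h
        · rcases List.mem_cons.mp hmem with hsc | hmem
          · exact absurd ⟨by omega, by omega⟩ hcg
          · exact Or.inr ⟨hmem, hle⟩

theorem map_toNat_sum (l : List Int) (h : ∀ x ∈ l, 0 ≤ x) :
    ((l.map Int.toNat).sum : Int) = l.sum := by
  induction l with
  | nil => simp
  | cons x tl ih =>
    have hx := h x (by simp)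
    simp only [List.map_cons, List.sum_cons, Nat.cast_add]
    rw [ih (fun y hy => h y (by simp [hy])), Int.toNat_of_nonneg hx]

theorem cast_sum_map (l : List Nat) : (l.map (fun x : Nat => (x:Int))).sum = ((l.sum : Nat) : Int) := by
  induction l with
  | nil => simp
  | cons x tl ih => simp only [List.map_cons, List.sum_cons, Nat.cast_add, ih]

-- PowP over the coin bitmask ↔ Ex over coins (coins nonnegative, s within range)
theorem PowP_iff_Ex (coins : List Int) (target : Int) (ht : 0 ≤ target)
    (hc : ∀ c ∈ coins, 0 ≤ c) (base : Nat)
    (hbase : ∀ s : Nat, base.testBit s = true ↔ ((s:Int) ∈ coins ∧ (s:Int) ≤ target))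
    (n s : Nat) (hs : (s:Int) ≤ target) :
    PowP base n s ↔ Ex coins n (s:Int) := by
  constructor
  · rintro ⟨l, hlen, hmem, hsum⟩
    refine ⟨l.map (fun x : Nat => (x : Int)), by simp [hlen], ?_, ?_⟩
    · intro x hx
      obtain ⟨y, hy, rfl⟩ := List.mem_map.mp hx
      exact ((hbase y).mp (hmem y hy)).1
    · rw [← hsum]
      exact cast_sum_map l
  · rintro ⟨l, hlen, hmem, hsum⟩
    have hnn : ∀ x ∈ l, (0:Int) ≤ x := fun x hx => hc x (hmem x hx)
    refine ⟨l.map Int.toNat, by simp [hlen], ?_, ?_⟩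
    · intro x hx
      obtain ⟨y, hy, rfl⟩ := List.mem_map.mp hx
      have hy0 : 0 ≤ y := hnn y hy
      have hysum : y ≤ l.sum := List.single_le_sum hnn y hy
      rw [hbase, Int.toNat_of_nonneg hy0]
      exact ⟨hmem y hy, by omega⟩
    · have := map_toNat_sum l hnn
      omega

-- (x >> n) & 1 == 1  is  testBit
theorem shiftRight_and_one (X n : Nat) :
    ((X >>> n) &&& 1 = 1) ↔ X.testBit n = true := by
  rw [Nat.and_one_is_mod]
  simp [Nat.testBit, Nat.one_and_eq_mod_two]

-- ---------- assembling B ----------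

theorem makeChanges_alt_eq_reachF (N k target : Int) (coins : List Int)
    (hk : 0 ≤ k) (ht : 0 ≤ target) (hpre : (∀ c ∈ coins, 0 ≤ c) ∨ k = 0 ∨ target = 0) :
    makeChanges_alt N k target coins = reachF coins target k.toNat target := by
  unfold makeChanges_alt
  by_cases hk0 : k = 0
  · subst hk0
    rw [if_pos rfl, Int.toNat_zero]
    simp [reachF]
  · rw [if_neg hk0]
    by_cases ht0 : target ≤ 0
    · have htz : target = 0 := le_antisymm ht0 ht
      subst htz
      rw [if_pos (le_refl 0)]
      obtain ⟨n, hn⟩ : ∃ n, k.toNat = n + 1 := ⟨k.toNat - 1, by omega⟩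
      rw [hn]
      simp [reachF]
    · rw [if_neg ht0]
      have ht1 : 1 ≤ target := by omega
      have hcoins : ∀ c ∈ coins, 0 ≤ c := by
        rcases hpre with h | h | h
        · exact h
        · exact absurd h hk0
        · omega
      set base : Nat := (PySem.Set.ofList coins : List Int).foldl
        (fun acc c => if 0 ≤ c ∧ c ≤ target then acc ||| (1 <<< c.toNat) else acc) 0 with hbdef
      have hbase : ∀ s : Nat, base.testBit s = true ↔ ((s:Int) ∈ coins ∧ (s:Int) ≤ target) := by
        intro s
        rw [hbdef, baseFold_testBit]
        simp [PySem.Set.mem_ofList]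
      have hb1 : IsPow target base 1 base := by
        intro s
        rw [PowP_one]
        constructor
        · intro h
          have hle := ((hbase s).mp h).2
          exact ⟨by omega, h⟩
        · rintro ⟨_, h⟩
          exact h
      have h1 : IsPow target base 0 1 := by
        intro s
        rw [PowP_zero]
        constructor
        · intro h
          have : s = 0 := by
            rcases Nat.lt_or_ge s 1 with h' | h'
            · omega
            · exfalso
              have : (1:Nat).testBit s = false := by
                apply Nat.testBit_lt_two_pow
                calc (1:Nat) < 2^1 := by norm_num
                  _ ≤ 2^s := Nat.pow_le_pow_right (by norm_num) h'
              simp [this] at h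
          exact ⟨by omega, this⟩
        · rintro ⟨_, rfl⟩
          decide
      have hkN : 1 ≤ k.toNat := by omega
      have hpow := IsPow_powGo target ht base k.toNat hkN base 1 0 1 hb1 h1
      rw [zero_add, Nat.mul_one] at hpow
      obtain ⟨n, hn⟩ : ∃ n, k.toNat = n + 1 := ⟨k.toNat - 1, by omega⟩
      have hEx := reachF_iff_Ex coins target hcoins k.toNat target
      have htcast : ((target.toNat : Nat) : Int) = target := Int.toNat_of_nonneg ht
      rw [Bool.eq_iff_iff, decide_eq_true_eq, shiftRight_and_one, hpow target.toNat, hEx]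
      rw [PowP_iff_Ex coins target ht hcoins base hbase k.toNat target.toNat (by omega), htcast]
      constructor
      · rintro ⟨_, hex⟩
        exact ⟨hex, Or.inr ⟨ht1, le_refl target⟩⟩
      · rintro ⟨hex, _⟩
        exact ⟨le_refl _, hex⟩

theorem makeChanges_eq_alt (N k target : Int) (coins : List Int)
    (hk : 0 ≤ k) (ht : 0 ≤ target) (hpre : (∀ c ∈ coins, 0 ≤ c) ∨ k = 0 ∨ target = 0) :
    makeChanges N k target coins = makeChanges_alt N k target coins := by
  rw [makeChanges_eq_reachF N k target coins hk ht,
    makeChanges_alt_eq_reachF N k target coins hk ht hpre]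

-- ===== VERDICT (by name: the statement is the Claim_ definition above) =====
theorem makeChanges_spec : Claim_equal_makeChanges := by
  intro N k target coins _ hpre
  unfold Spec_makeChanges
  exact makeChanges_eq_alt N k target coins hpre.1 hpre.2.1 hpre.2.2
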